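-- pv_equiv track=rewrite | github.com/MSFT-Codeforces/Junk_beacon_rank_ledger | misc/test_case_validator.py | validate_cases_concatenated
-- ===== SOURCE A (Python) =====
-- class DSU:
--     __slots__ = ("p", "sz", "cc")
--     def __init__(self, n: int):
--         self.p = list(range(n))
--         self.sz = [1] * n
--         self.cc = n
--
--     def find(self, a: int) -> int:
--         p = self.p
--         while p[a] != a:
--             p[a] = p[p[a]]
--             a = p[a]
--         return a
--
--     def union(self, a: int, b: int) -> None:
--         ra = self.find(a)
--         rb = self.find(b)
--         if ra == rb:
--             return
--         if self.sz[ra] < self.sz[rb]: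
--             ra, rb = rb, ra
--         self.p[rb] = ra
--         self.sz[ra] += self.sz[rb]
--         self.cc -= 1
--
-- def parse_one_case(lines, idx):
--     # returns (ok, new_idx)
--     if idx >= len(lines):
--         return (False, idx)
--
--     parts = lines[idx].split(" ")
--     if len(parts) != 2:
--         return (False, idx)
--     try:
--         n = int(parts[0]); m = int(parts[1])
--     except:
--         return (False, idx)
--
--     # constraints
--     if not (2 <= n <= 2 * 10**5):
--         return (False, idx)
--     if not (n - 1 <= m <= 2 * 10**5):
--         return (False, idx)
--
--     # Need lines idx+1 ... idx+m
--     if idx + m >= len(lines):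
--         return (False, idx)
--
--     dsu = DSU(n)
--
--     for j in range(1, m + 1):
--         parts = lines[idx + j].split(" ")
--         if len(parts) != 3:
--             return (False, idx)
--         try:
--             u = int(parts[0]); v = int(parts[1]); w = int(parts[2])
--         except:
--             return (False, idx)
--
--         if not (1 <= u <= n and 1 <= v <= n):
--             return (False, idx)
--         if not (-10**9 <= w <= 10**9):
--             return (False, idx)
--
--         # connectedness considers undirected adjacency; self-loops don't help but are allowed.
--         if u != v:
--             dsu.union(u - 1, v - 1)
--
--     # graph must be connected (undirected)
--     if dsu.cc != 1:
--         return (False, idx)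
--
--     return (True, idx + 1 + m)
--
-- def validate_cases_concatenated(lines):
--     idx = 0
--     while idx < len(lines):
--         ok, idx2 = parse_one_case(lines, idx)
--         if not ok:
--             return False
--         idx = idx2
--     return True
-- ===== SOURCE B (Python) =====
-- # B: staged decomposition -- consume the input as list suffixes (no index arithmetic),
-- # parse whole lines to int lists at once, collect/validate all edge lines of a case
-- # into an edge list first, then decide connectivity with a weighted quick-find label
-- # array (instead of A's interleaved path-compressing union-find forest with a counter).
--
-- def _ints(parts):
--     try:
--         return [int(p) for p in parts]
--     except ValueError:
--         return None
--
-- def _edges_of(body, n):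
--     # validate every edge line; return the list of non-loop edges, or None on any bad line
--     edges = []
--     for ln in body:
--         vals = _ints(ln.split(" "))
--         if vals is None or len(vals) != 3:
--             return None
--         u, v, w = vals
--         if not (1 <= u <= n and 1 <= v <= n and -10**9 <= w <= 10**9):
--             return None
--         if u != v:
--             edges.append((u, v))
--     return edges
--
-- def _connected(n, edges):
--     label = list(range(n))
--     comp = [[i] for i in range(n)]
--     for (u, v) in edges:
--         a = label[u - 1]; b = label[v - 1]
--         if a != b:
--             if len(comp[a]) < len(comp[b]):
--                 a, b = b, a
--             for x in comp[b]:
--                 label[x] = a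
--             comp[a].extend(comp[b])
--             comp[b] = []
--     return all(t == label[0] for t in label)
--
-- def validate_cases_concatenated(lines):
--     rest = lines
--     while rest:
--         vals = _ints(rest[0].split(" "))
--         if vals is None or len(vals) != 2:
--             return False
--         n, m = vals
--         if not (2 <= n <= 2 * 10**5 and n - 1 <= m <= 2 * 10**5) or len(rest) <= m:
--             return False
--         edges = _edges_of(rest[1:m + 1], n)
--         if edges is None or not _connected(n, edges):
--             return False
--         rest = rest[m + 1:]
--     return True
-- ===== Notes on version B (the rewrite author's own statement) =====
-- stated objective: alternative
-- what changed: Replaced the index-driven while loop interleaving a path-compressing union-by-size DSU with parsing by a staged suffix-consuming loop: each line is parsed to an int list at once, all edge lines of a case are first validated and collected into an edge list, and connectivity is then decided separately by a weighted quick-find (label array plus per-component member lists, relabelling the smaller side) with a final all-labels-equal check instead of a component counter.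
import Mathlib
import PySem

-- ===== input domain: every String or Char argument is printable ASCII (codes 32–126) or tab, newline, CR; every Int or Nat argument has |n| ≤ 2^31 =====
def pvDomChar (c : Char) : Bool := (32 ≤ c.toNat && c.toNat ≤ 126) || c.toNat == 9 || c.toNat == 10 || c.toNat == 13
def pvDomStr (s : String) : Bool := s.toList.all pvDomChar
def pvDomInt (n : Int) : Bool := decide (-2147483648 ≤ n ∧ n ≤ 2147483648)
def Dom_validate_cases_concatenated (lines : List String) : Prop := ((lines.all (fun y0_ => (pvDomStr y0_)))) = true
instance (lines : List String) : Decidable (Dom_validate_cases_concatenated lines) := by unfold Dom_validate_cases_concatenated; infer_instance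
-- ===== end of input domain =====

-- B replaces A's index-driven loop + interleaved union-find (path compression, union by
-- size, component counter) by a staged suffix-consuming pass: parse each line to an int
-- list at once, collect the validated edge list first, then decide connectivity by a
-- weighted quick-find label array with a final all-labels-equal check; same return value.

-- ===== PORT A =====
-- DSU.find: `while p[a] != a: p[a] = p[p[a]]; a = p[a]` (fuel len(p) suffices; proved below)
def dsuFindLoop : Nat → List Int → Int → (List Int × Int)
  | 0, p, a => (p, a)
  | fuel+1, p, a =>
    let pa := PySem.List.pyGetD p a 0
    if pa = a then (p, a)
    else
      let ppa := PySem.List.pyGetD p pa 0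
      dsuFindLoop fuel (PySem.List.pySetD p a ppa) ppa

def dsuFind (p : List Int) (a : Int) : List Int × Int := dsuFindLoop p.length p a

def dsuUnion (p sz : List Int) (cc : Int) (a b : Int) : List Int × List Int × Int :=
  let fa := dsuFind p a
  let fb := dsuFind fa.1 b
  let p2 := fb.1
  let ra := fa.2
  let rb := fb.2
  if ra = rb then (p2, sz, cc)
  else
    let s := if PySem.List.pyGetD sz ra 0 < PySem.List.pyGetD sz rb 0 then (rb, ra) else (ra, rb)
    (PySem.List.pySetD p2 s.2 s.1,
     PySem.List.pySetD sz s.1 (PySem.List.pyGetD sz s.1 0 + PySem.List.pyGetD sz s.2 0),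
     cc - 1)

-- body of the `for j in range(1, m+1)` edge loop; `none` = an early `return (False, idx)`
def edgeStepA (lines : List String) (idx n j : Int) (st : List Int × List Int × Int) :
    Option (List Int × List Int × Int) :=
  let parts := (PySem.Str.split? (PySem.List.pyGetD lines (idx + j) "") " ").getD []
  if parts.length ≠ 3 then none
  else
    match PySem.Int.ofStr? (PySem.List.pyGetD parts 0 ""), PySem.Int.ofStr? (PySem.List.pyGetD parts 1 ""),
          PySem.Int.ofStr? (PySem.List.pyGetD parts 2 "") with
    | some u, some v, some w =>
      if ¬ (1 ≤ u ∧ u ≤ n ∧ 1 ≤ v ∧ v ≤ n) then none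
      else if ¬ (-(10^9 : Int) ≤ w ∧ w ≤ 10^9) then none
      else if u ≠ v then some (dsuUnion st.1 st.2.1 st.2.2 (u-1) (v-1))
      else some st
    | _, _, _ => none

def edgeLoopA (lines : List String) (idx : Int) (n : Int) :
    List Int → List Int × List Int × Int → Option (List Int × List Int × Int)
  | [], st => some st
  | j :: js, st =>
    match edgeStepA lines idx n j st with
    | none => none
    | some st' => edgeLoopA lines idx n js st' 

def parse_one_case (lines : List String) (idx : Int) : Bool × Int :=
  if (lines.length : Int) ≤ idx then (false, idx)
  else
    let parts := (PySem.Str.split? (PySem.List.pyGetD lines idx "") " ").getD []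
    if parts.length ≠ 2 then (false, idx)
    else
      match PySem.Int.ofStr? (PySem.List.pyGetD parts 0 ""), PySem.Int.ofStr? (PySem.List.pyGetD parts 1 "") with
      | some n, some m =>
        if ¬ (2 ≤ n ∧ n ≤ 2 * 10^5) then (false, idx)
        else if ¬ (n - 1 ≤ m ∧ m ≤ 2 * 10^5) then (false, idx)
        else if (lines.length : Int) ≤ idx + m then (false, idx)
        else
          match edgeLoopA lines idx n (PySem.List.pyRange 1 (m+1) 1)
              (PySem.List.pyRange 0 n 1, List.replicate n.toNat 1, n) with
          | none => (false, idx)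
          | some st => if st.2.2 ≠ 1 then (false, idx) else (true, idx + 1 + m)
      | _, _ => (false, idx)

-- `while idx < len(lines)` (each accepted case advances idx by ≥ 2, so fuel len+1 suffices)
def caseLoopA (lines : List String) : Nat → Int → Bool
  | 0, _ => true
  | fuel+1, idx =>
    if idx < (lines.length : Int) then
      let r := parse_one_case lines idx
      if r.1 = false then false else caseLoopA lines fuel r.2
    else true

def validate_cases_concatenated (lines : List String) : Bool :=
  caseLoopA lines (lines.length + 1) 0

-- ===== PORT B =====
-- `_ints`: parse every token of the split line, None on any ValueError
def intsOf (parts : List String) : Option (List Int) := parts.mapM PySem.Int.ofStr?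

-- weighted quick-find merge: relabel the smaller component, concatenate member lists
def qfUnion (label : List Int) (comp : List (List Int)) (a b : Int) :
    List Int × List (List Int) :=
  let a0 := PySem.List.pyGetD label a 0
  let b0 := PySem.List.pyGetD label b 0
  if a0 = b0 then (label, comp)
  else
    let t := if (PySem.List.pyGetD comp a0 []).length < (PySem.List.pyGetD comp b0 []).length
             then (b0, a0) else (a0, b0)
    let label' := (PySem.List.pyGetD comp t.2 []).foldl (fun lb x => PySem.List.pySetD lb x t.1) label
    let comp' := PySem.List.pySetD
        (PySem.List.pySetD comp t.1 (PySem.List.pyGetD comp t.1 [] ++ PySem.List.pyGetD comp t.2 []))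
        t.2 []
    (label', comp')

-- `_edges_of`: validate each edge line, accumulate the non-loop edges
def edgesOf (n : Int) : List String → List (Int × Int) → Option (List (Int × Int))
  | [], acc => some acc
  | ln :: body, acc =>
    match intsOf ((PySem.Str.split? ln " ").getD []) with
    | some [u, v, w] =>
      if 1 ≤ u ∧ u ≤ n ∧ 1 ≤ v ∧ v ≤ n ∧ -(10^9 : Int) ≤ w ∧ w ≤ 10^9 then
        edgesOf n body (if u ≠ v then acc ++ [(u, v)] else acc)
      else none
    | _ => none

-- `_connected`: fold the quick-find over the edge list, then all labels equal label[0]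
def connectedB (n : Int) (edges : List (Int × Int)) : Bool :=
  let st := edges.foldl (fun st e => qfUnion st.1 st.2 (e.1 - 1) (e.2 - 1))
      (PySem.List.pyRange 0 n 1, (PySem.List.pyRange 0 n 1).map (fun i => [i]))
  st.1.all (fun t => t == PySem.List.pyGetD st.1 0 0)

-- `while rest:` consuming a suffix of the lines each round (`len(rest)` = body.length + 1)
def caseLoopB : List String → Bool
  | [] => true
  | first :: body =>
    match intsOf ((PySem.Str.split? first " ").getD []) with
    | some [n, m] =>
      if (2 ≤ n ∧ n ≤ 2 * 10^5 ∧ n - 1 ≤ m ∧ m ≤ 2 * 10^5) ∧ ¬ ((body.length : Int) + 1 ≤ m) then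
        match edgesOf n (body.take m.toNat) [] with
        | none => false
        | some es => if connectedB n es then caseLoopB (body.drop m.toNat) else false
      else false
    | _ => false
  termination_by rest => rest.length
  decreasing_by simp [List.length_drop]

def validate_cases_concatenated_alt (lines : List String) : Bool := caseLoopB lines

-- ===== PRECONDITION & SPEC =====
def Spec_validate_cases_concatenated (lines : List String) (out : Bool) : Prop := out = validate_cases_concatenated_alt lines
instance (lines : List String) (out : Bool) : Decidable (Spec_validate_cases_concatenated lines out) := by unfold Spec_validate_cases_concatenated; infer_instance

-- ===== CLAIM (what is proved, stated in full; the proofs are below) =====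
def Claim_equal_validate_cases_concatenated : Prop := ∀ (lines : List String), Dom_validate_cases_concatenated lines → Spec_validate_cases_concatenated lines (validate_cases_concatenated lines)

-- ===== LEMMAS AND PROOFS =====

-- ---------- abstract view of A's DSU parent list ----------
def qstep (p : List Int) (a : Int) : Int := PySem.List.pyGetD p a 0

def iterP (p : List Int) : Nat → Int → Int
  | 0, a => a
  | d+1, a => iterP p d (qstep p a)

def rootP (p : List Int) (a : Int) : Int := iterP p p.length a

def InR (N : Nat) (x : Int) : Prop := 0 ≤ x ∧ x < (N : Int)

-- well-formed parent list: steps stay in range and strictly decrease some rank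
def WFp (p : List Int) (rk : Int → Nat) : Prop :=
  (∀ a, InR p.length a → InR p.length (qstep p a)) ∧
  (∀ a, InR p.length a → qstep p a ≠ a → rk (qstep p a) < rk a)

def Lb (label : List Int) (j : Int) : Int := PySem.List.pyGetD label j 0

-- the coupling invariant between A's DSU state and B's quick-find state
def QInv (N : Nat) (p : List Int) (cc : Int) (label : List Int) (comp : List (List Int)) : Prop :=
  p.length = N ∧ label.length = N ∧ comp.length = N ∧
  (∃ rk, WFp p rk) ∧
  (∀ j, InR N j → InR N (Lb label j)) ∧
  (∀ j k, InR N j → InR N k → (rootP p j = rootP p k ↔ Lb label j = Lb label k)) ∧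
  (∀ c, InR N c → ∀ j : Int, j ∈ PySem.List.pyGetD comp c [] ↔ (InR N j ∧ Lb label j = c)) ∧
  cc = (((Finset.Icc (0:Int) ((N:Int)-1)).image (fun k => rootP p k)).card : Int)

theorem pyGetD_pySetD_int {α : Type} (p : List α) (x : Int) (y : α) (z : Int) (d : α)
    (hx : InR p.length x) (hz : InR p.length z) :
    PySem.List.pyGetD (PySem.List.pySetD p x y) z d = if z = x then y else PySem.List.pyGetD p z d := by
  obtain ⟨hx0, hx1⟩ := hx
  obtain ⟨hz0, hz1⟩ := hz
  rw [PySem.List.pySetD_of_nonneg p y hx0]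
  rw [PySem.List.pyGetD_eq_getElem _ _ hz0 (by simpa using hz1)]
  rw [List.getElem_set]
  split_ifs with h1 h2 h3
  · rfl
  · exact absurd (by omega : z = x) h2
  · exact absurd (by omega : x.toNat = z.toNat) h1
  · rw [PySem.List.pyGetD_eq_getElem _ _ hz0 hz1]

theorem qstep_set (p : List Int) (x y z : Int) (hx : InR p.length x) (hz : InR p.length z) :
    qstep (PySem.List.pySetD p x y) z = if z = x then y else qstep p z :=
  pyGetD_pySetD_int p x y z 0 hx hz

theorem iterP_add (p : List Int) (d e : Nat) (a : Int) :
    iterP p (d + e) a = iterP p e (iterP p d a) := by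
  induction d generalizing a with
  | zero => simp [iterP]
  | succ d ih =>
    have h1 : d + 1 + e = (d + e) + 1 := by omega
    rw [h1]
    show iterP p (d + e) (qstep p a) = iterP p e (iterP p (d+1) a)
    rw [ih]
    rfl

theorem iterP_fix (p : List Int) (x : Int) (h : qstep p x = x) (d : Nat) : iterP p d x = x := by
  induction d with
  | zero => rfl
  | succ d ih =>
    show iterP p d (qstep p x) = x
    rw [h]
    exact ih

theorem iterP_stable (p : List Int) (d e : Nat) (a : Int) (hde : d ≤ e)
    (h : qstep p (iterP p d a) = iterP p d a) : iterP p e a = iterP p d a := by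
  have h1 : e = d + (e - d) := by omega
  rw [h1, iterP_add]
  exact iterP_fix p _ h _

theorem iterP_inR (p : List Int) (rk : Int → Nat) (h : WFp p rk) (a : Int) (ha : InR p.length a)
    (d : Nat) : InR p.length (iterP p d a) := by
  induction d generalizing a with
  | zero => exact ha
  | succ d ih =>
    show InR p.length (iterP p d (qstep p a))
    exact ih _ (h.1 a ha)

theorem root_of_fix (p : List Int) (a : Int) (h : qstep p a = a) : rootP p a = a := by
  exact iterP_fix p a h p.length

theorem reach_fix (p : List Int) (rk : Int → Nat) (h : WFp p rk) :
    ∀ c (a : Int), InR p.length a →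
      ((Finset.Icc (0:Int) ((p.length:Int)-1)).filter (fun k => rk k < rk a)).card ≤ c →
      ∃ d ≤ c, qstep p (iterP p d a) = iterP p d a := by
  intro c
  induction c with
  | zero =>
    intro a ha hcard
    by_cases hfix : qstep p a = a
    · exact ⟨0, le_refl 0, hfix⟩
    · exfalso
      have hmem : qstep p a ∈ (Finset.Icc (0:Int) ((p.length:Int)-1)).filter (fun k => rk k < rk a) := by
        rw [Finset.mem_filter, Finset.mem_Icc]
        have h1 := h.1 a ha
        have h2 := h.2 a ha hfix
        exact ⟨⟨h1.1, by have := h1.2; omega⟩, h2⟩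
      have : 0 < ((Finset.Icc (0:Int) ((p.length:Int)-1)).filter (fun k => rk k < rk a)).card :=
        Finset.card_pos.mpr ⟨_, hmem⟩
      omega
  | succ c ih =>
    intro a ha hcard
    by_cases hfix : qstep p a = a
    · exact ⟨0, Nat.zero_le _, hfix⟩
    · have h1 := h.1 a ha
      have h2 := h.2 a ha hfix
      have hmem : qstep p a ∈ (Finset.Icc (0:Int) ((p.length:Int)-1)).filter (fun k => rk k < rk a) := by
        rw [Finset.mem_filter, Finset.mem_Icc]
        exact ⟨⟨h1.1, by have := h1.2; omega⟩, h2⟩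
      have hsub : (Finset.Icc (0:Int) ((p.length:Int)-1)).filter (fun k => rk k < rk (qstep p a)) ⊆
          ((Finset.Icc (0:Int) ((p.length:Int)-1)).filter (fun k => rk k < rk a)).erase (qstep p a) := by
        intro k hk
        rw [Finset.mem_filter] at hk
        rw [Finset.mem_erase, Finset.mem_filter]
        refine ⟨?_, hk.1, by omega⟩
        intro hkeq
        rw [hkeq] at hk
        omega
      have hcard2 : ((Finset.Icc (0:Int) ((p.length:Int)-1)).filter (fun k => rk k < rk (qstep p a))).card ≤ c := by
        have h3 := Finset.card_le_card hsub
        rw [Finset.card_erase_of_mem hmem] at h3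
        have h4 := Finset.card_pos.mpr ⟨_, hmem⟩
        omega
      obtain ⟨d, hd, hdfix⟩ := ih (qstep p a) h1 hcard2
      refine ⟨d + 1, by omega, ?_⟩
      show qstep p (iterP p d (qstep p a)) = iterP p d (qstep p a)
      exact hdfix

theorem card_filter_rk_lt (p : List Int) (rk : Int → Nat) (a : Int) (ha : InR p.length a) :
    ((Finset.Icc (0:Int) ((p.length:Int)-1)).filter (fun k => rk k < rk a)).card < p.length := by
  have hsub : (Finset.Icc (0:Int) ((p.length:Int)-1)).filter (fun k => rk k < rk a) ⊆
      (Finset.Icc (0:Int) ((p.length:Int)-1)).erase a := by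
    intro k hk
    rw [Finset.mem_filter] at hk
    rw [Finset.mem_erase]
    refine ⟨?_, hk.1⟩
    intro hkeq
    rw [hkeq] at hk
    omega
  have hmem : a ∈ Finset.Icc (0:Int) ((p.length:Int)-1) := by
    rw [Finset.mem_Icc]
    exact ⟨ha.1, by have := ha.2; omega⟩
  have h1 := Finset.card_le_card hsub
  rw [Finset.card_erase_of_mem hmem] at h1
  have h2 : (Finset.Icc (0:Int) ((p.length:Int)-1)).card = p.length := by
    rw [Int.card_Icc]
    have : 1 ≤ (p.length : Int) := by have := ha.2; have := ha.1; omega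
    omega
  rw [h2] at h1
  have h3 : 1 ≤ p.length := by have := ha.2; have := ha.1; omega
  omega

theorem root_isFix (p : List Int) (rk : Int → Nat) (h : WFp p rk) (a : Int) (ha : InR p.length a) :
    qstep p (rootP p a) = rootP p a := by
  obtain ⟨d, hd, hdfix⟩ := reach_fix p rk h
    (((Finset.Icc (0:Int) ((p.length:Int)-1)).filter (fun k => rk k < rk a)).card) a ha (le_refl _)
  have hdlen : d ≤ p.length := le_of_lt (lt_of_le_of_lt hd (card_filter_rk_lt p rk a ha))
  unfold rootP
  rw [iterP_stable p d p.length a hdlen hdfix]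
  exact hdfix

theorem root_step (p : List Int) (rk : Int → Nat) (h : WFp p rk) (a : Int) (ha : InR p.length a) :
    rootP p (qstep p a) = rootP p a := by
  have h1 : rootP p (qstep p a) = iterP p (p.length + 1) a := rfl
  rw [h1]
  exact iterP_stable p p.length (p.length + 1) a (by omega) (root_isFix p rk h a ha)

theorem root_inR (p : List Int) (rk : Int → Nat) (h : WFp p rk) (a : Int) (ha : InR p.length a) :
    InR p.length (rootP p a) := by
  exact iterP_inR p rk h a ha p.length

theorem rk_root_le (p : List Int) (rk : Int → Nat) (h : WFp p rk) (a : Int) (ha : InR p.length a) :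
    rk (rootP p a) ≤ rk a := by
  generalize hn : rk a = nn
  induction nn using Nat.strong_induction_on generalizing a with
  | _ n ih =>
    by_cases hfix : qstep p a = a
    · rw [root_of_fix p a hfix, hn]
    · have h2 := h.2 a ha hfix
      rw [← root_step p rk h a ha]
      have := ih (rk (qstep p a)) (by omega) (qstep p a) (h.1 a ha) rfl
      omega

theorem fix_of_root_eq_self (p : List Int) (rk : Int → Nat) (h : WFp p rk) (a : Int)
    (ha : InR p.length a) (hr : rootP p a = a) : qstep p a = a := by
  by_contra hfix
  have h2 := h.2 a ha hfix
  have h3 := rk_root_le p rk h (qstep p a) (h.1 a ha)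
  rw [root_step p rk h a ha, hr] at h3
  omega

-- path-compression style update: redirect x to y inside its own class, same rank certificate
theorem set_preserve (p : List Int) (rk : Int → Nat) (h : WFp p rk) (x y : Int)
    (hx : InR p.length x) (hy : InR p.length y) (hrk : rk y < rk x)
    (hroot : rootP p y = rootP p x) :
    WFp (PySem.List.pySetD p x y) rk ∧
    (∀ b, InR p.length b → rootP (PySem.List.pySetD p x y) b = rootP p b) := by
  have hlen : (PySem.List.pySetD p x y).length = p.length := PySem.List.length_pySetD p x y
  have hyx : y ≠ x := fun he => by rw [he] at hrk; omega
  have hwf' : WFp (PySem.List.pySetD p x y) rk := by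
    constructor
    · intro z hz
      rw [hlen] at hz ⊢
      rw [qstep_set p x y z hx hz]
      split_ifs with he
      · exact hy
      · exact h.1 z hz
    · intro z hz hne
      rw [hlen] at hz
      rw [qstep_set p x y z hx hz] at hne ⊢
      split_ifs at hne ⊢ with he
      · rw [he]; exact hrk
      · exact h.2 z hz hne
  refine ⟨hwf', ?_⟩
  intro b hb
  generalize hn : rk b = nn
  induction nn using Nat.strong_induction_on generalizing b with
  | _ n ih =>
    by_cases hfix : qstep (PySem.List.pySetD p x y) b = b
    · have hbx : b ≠ x := by
        intro he
        rw [he, qstep_set p x y x hx hx, if_pos rfl] at hfix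
        exact hyx hfix
      have hfixp : qstep p b = b := by
        rw [qstep_set p x y b hx hb, if_neg hbx] at hfix
        exact hfix
      rw [root_of_fix _ b hfix, root_of_fix p b hfixp]
    · have hstep : rootP (PySem.List.pySetD p x y) b =
          rootP (PySem.List.pySetD p x y) (qstep (PySem.List.pySetD p x y) b) := by
        have := root_step (PySem.List.pySetD p x y) rk hwf' b (by rw [hlen]; exact hb)
        exact this.symm
      have hbin' : InR (PySem.List.pySetD p x y).length b := by rw [hlen]; exact hb
      have hqin : InR p.length (qstep (PySem.List.pySetD p x y) b) := by
        have := hwf'.1 b hbin'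
        rw [hlen] at this
        exact this
      have hdec : rk (qstep (PySem.List.pySetD p x y) b) < rk b := hwf'.2 b hbin' hfix
      have hih := ih (rk (qstep (PySem.List.pySetD p x y) b)) (by omega) _ hqin rfl
      rw [hstep, hih]
      by_cases hbx : b = x
      · rw [hbx, qstep_set p x y x hx hx, if_pos rfl]
        exact hroot
      · rw [qstep_set p x y b hx hb, if_neg hbx]
        exact root_step p rk h b hb

-- union update: hang root rb under root ra
theorem union_set (p : List Int) (rk : Int → Nat) (h : WFp p rk) (ra rb : Int)
    (hra : InR p.length ra) (hrb : InR p.length rb)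
    (hfa : qstep p ra = ra) (hfb : qstep p rb = rb) (hne : ra ≠ rb) :
    (∃ rk', WFp (PySem.List.pySetD p rb ra) rk') ∧
    (∀ b, InR p.length b →
      rootP (PySem.List.pySetD p rb ra) b = if rootP p b = rb then ra else rootP p b) := by
  have hlen : (PySem.List.pySetD p rb ra).length = p.length := PySem.List.length_pySetD p rb ra
  have hrootra : rootP p ra = ra := root_of_fix p ra hfa
  have hrootrb : rootP p rb = rb := root_of_fix p rb hfb
  set rk' : Int → Nat := fun k => rk k + (if rootP p k = rb then rk ra + 1 else 0) with hrk'
  have hwf' : WFp (PySem.List.pySetD p rb ra) rk' := by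
    constructor
    · intro z hz
      rw [hlen] at hz ⊢
      rw [qstep_set p rb ra z hrb hz]
      split_ifs with he
      · exact hra
      · exact h.1 z hz
    · intro z hz hnz
      rw [hlen] at hz
      rw [qstep_set p rb ra z hrb hz] at hnz ⊢
      split_ifs at hnz ⊢ with he
      · rw [he]
        simp only [hrk']
        simp [hrootra, hrootrb, hne]
        omega
      · have hne2 : qstep p z ≠ z := hnz
        have hdec := h.2 z hz hne2
        have hsame : rootP p (qstep p z) = rootP p z := root_step p rk h z hz
        simp only [hrk', hsame]
        split_ifs <;> omega
  refine ⟨⟨rk', hwf'⟩, ?_⟩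
  intro b hb
  generalize hn : rk b = nn
  induction nn using Nat.strong_induction_on generalizing b with
  | _ n ih =>
    by_cases hfix : qstep (PySem.List.pySetD p rb ra) b = b
    · have hbrb : b ≠ rb := by
        intro he
        rw [he, qstep_set p rb ra rb hrb hrb, if_pos rfl] at hfix
        exact hne hfix
      have hfixp : qstep p b = b := by
        rw [qstep_set p rb ra b hrb hb, if_neg hbrb] at hfix
        exact hfix
      rw [root_of_fix _ b hfix, root_of_fix p b hfixp, if_neg hbrb]
    · by_cases hbrb : b = rb
      · rw [hbrb]
        have h1 : qstep (PySem.List.pySetD p rb ra) rb = ra := by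
          rw [qstep_set p rb ra rb hrb hrb, if_pos rfl]
        have h2 : rootP (PySem.List.pySetD p rb ra) rb =
            rootP (PySem.List.pySetD p rb ra) ra := by
          have := root_step (PySem.List.pySetD p rb ra) rk' hwf' rb (by rw [hlen]; exact hrb)
          rw [h1] at this
          exact this.symm
        have h3 : qstep (PySem.List.pySetD p rb ra) ra = ra := by
          rw [qstep_set p rb ra ra hrb hra, if_neg hne]
          exact hfa
        rw [h2, root_of_fix _ ra h3, hrootrb, if_pos rfl]
      · have hqeq : qstep (PySem.List.pySetD p rb ra) b = qstep p b := by
          rw [qstep_set p rb ra b hrb hb, if_neg hbrb]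
        have hfixp : qstep p b ≠ b := by rw [← hqeq]; exact hfix
        have hdec := h.2 b hb hfixp
        have hqin : InR p.length (qstep p b) := h.1 b hb
        have hih := ih (rk (qstep p b)) (by omega) _ hqin rfl
        have hstep : rootP (PySem.List.pySetD p rb ra) b =
            rootP (PySem.List.pySetD p rb ra) (qstep p b) := by
          have := root_step (PySem.List.pySetD p rb ra) rk' hwf' b (by rw [hlen]; exact hb)
          rw [hqeq] at this
          exact this.symm
        have hsame : rootP p (qstep p b) = rootP p b := root_step p rk h b hb
        rw [hstep, hih, hsame]

theorem find_loop_spec (rk : Int → Nat) :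
    ∀ fuel (p : List Int) (a : Int), WFp p rk → InR p.length a →
      ((Finset.Icc (0:Int) ((p.length:Int)-1)).filter (fun k => rk k < rk a)).card < fuel →
      ∃ p', dsuFindLoop fuel p a = (p', rootP p a) ∧ p'.length = p.length ∧ WFp p' rk ∧
        (∀ b, InR p.length b → rootP p' b = rootP p b) := by
  intro fuel
  induction fuel with
  | zero => intro p a _ _ hcard; omega
  | succ fuel ih =>
    intro p a hwf ha hcard
    by_cases hfix : PySem.List.pyGetD p a 0 = a
    · refine ⟨p, ?_, rfl, hwf, fun b _ => rfl⟩
      rw [root_of_fix p a hfix]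
      simp [dsuFindLoop, hfix]
    · have hfix' : qstep p a ≠ a := hfix
      have hpa : InR p.length (qstep p a) := hwf.1 a ha
      have hppa : InR p.length (qstep p (qstep p a)) := hwf.1 _ hpa
      have hrkpa : rk (qstep p a) < rk a := hwf.2 a ha hfix'
      have hrkppa : rk (qstep p (qstep p a)) < rk a := by
        by_cases h2 : qstep p (qstep p a) = qstep p a
        · rw [h2]; exact hrkpa
        · have := hwf.2 _ hpa h2; omega
      have hroot2 : rootP p (qstep p (qstep p a)) = rootP p a := by
        rw [root_step p rk hwf _ hpa, root_step p rk hwf a ha]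
      obtain ⟨hwf1, hroots1⟩ := set_preserve p rk hwf a (qstep p (qstep p a)) ha hppa hrkppa hroot2
      have hlen1 : (PySem.List.pySetD p a (qstep p (qstep p a))).length = p.length :=
        PySem.List.length_pySetD _ _ _
      have hmem : qstep p (qstep p a) ∈
          (Finset.Icc (0:Int) ((p.length:Int)-1)).filter (fun k => rk k < rk a) := by
        rw [Finset.mem_filter, Finset.mem_Icc]
        exact ⟨⟨hppa.1, by have := hppa.2; omega⟩, hrkppa⟩
      have hsub : (Finset.Icc (0:Int) ((p.length:Int)-1)).filter (fun k => rk k < rk (qstep p (qstep p a))) ⊆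
          ((Finset.Icc (0:Int) ((p.length:Int)-1)).filter (fun k => rk k < rk a)).erase (qstep p (qstep p a)) := by
        intro k hk
        rw [Finset.mem_filter] at hk
        rw [Finset.mem_erase, Finset.mem_filter]
        refine ⟨?_, hk.1, by omega⟩
        intro hkeq
        rw [hkeq] at hk
        omega
      have hcard2 : ((Finset.Icc (0:Int) ((p.length:Int)-1)).filter (fun k => rk k < rk (qstep p (qstep p a)))).card < fuel := by
        have h3 := Finset.card_le_card hsub
        rw [Finset.card_erase_of_mem hmem] at h3
        have h4 := Finset.card_pos.mpr ⟨_, hmem⟩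
        omega
      obtain ⟨p', heq, hlen', hwf', hroots'⟩ := ih (PySem.List.pySetD p a (qstep p (qstep p a)))
        (qstep p (qstep p a)) hwf1 (by rw [hlen1]; exact hppa) (by rw [hlen1]; exact hcard2)
      refine ⟨p', ?_, by rw [hlen', hlen1], hwf', ?_⟩
      · have hstep : dsuFindLoop (fuel+1) p a =
            dsuFindLoop fuel (PySem.List.pySetD p a (qstep p (qstep p a))) (qstep p (qstep p a)) := by
          simp only [dsuFindLoop, hfix]
          rfl
        rw [hstep, heq, hroots1 _ hppa, hroot2]
      · intro b hb
        rw [hroots' b (by rw [hlen1]; exact hb), hroots1 b hb]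

theorem dsuFind_spec (p : List Int) (rk : Int → Nat) (h : WFp p rk) (a : Int)
    (ha : InR p.length a) :
    ∃ p', dsuFind p a = (p', rootP p a) ∧ p'.length = p.length ∧ WFp p' rk ∧
      (∀ b, InR p.length b → rootP p' b = rootP p b) := by
  exact find_loop_spec rk p.length p a h ha (card_filter_rk_lt p rk a ha)

theorem merge_eq_iff (x y u v : Int) (_huv : u ≠ v) :
    ((if x = v then u else x) = (if y = v then u else y)) ↔
      (x = y ∨ ((x = u ∨ x = v) ∧ (y = u ∨ y = v))) := by
  split_ifs <;> omega

theorem foldl_pySetD_spec (aa : Int) :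
    ∀ (L : List Int) (lb : List Int) (j : Int), InR lb.length j → (∀ x ∈ L, InR lb.length x) →
      Lb (L.foldl (fun lb x => PySem.List.pySetD lb x aa) lb) j =
        if j ∈ L then aa else Lb lb j := by
  intro L
  induction L with
  | nil => intro lb j _ _; simp
  | cons x L ih =>
    intro lb j hj hL
    have hx : InR lb.length x := hL x (by simp)
    have hlen : (PySem.List.pySetD lb x aa).length = lb.length := PySem.List.length_pySetD _ _ _
    have h1 : Lb ((x :: L).foldl (fun lb x => PySem.List.pySetD lb x aa) lb) j =
        if j ∈ L then aa else Lb (PySem.List.pySetD lb x aa) j := by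
      show Lb (L.foldl (fun lb x => PySem.List.pySetD lb x aa) (PySem.List.pySetD lb x aa)) j = _
      exact ih (PySem.List.pySetD lb x aa) j (by rw [hlen]; exact hj)
        (fun t ht => by rw [hlen]; exact hL t (by simp [ht]))
    rw [h1]
    have h2 : Lb (PySem.List.pySetD lb x aa) j = if j = x then aa else Lb lb j :=
      qstep_set lb x aa j hx hj
    rw [h2]
    by_cases hjl : j ∈ L
    · simp [hjl]
    · by_cases hjx : j = x
      · simp [hjx]
      · simp [hjl, hjx]

theorem foldl_pySetD_length (aa : Int) :
    ∀ (L : List Int) (lb : List Int),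
      (L.foldl (fun lb x => PySem.List.pySetD lb x aa) lb).length = lb.length := by
  intro L
  induction L with
  | nil => intro lb; rfl
  | cons x L ih =>
    intro lb
    show (L.foldl (fun lb x => PySem.List.pySetD lb x aa) (PySem.List.pySetD lb x aa)).length = _
    rw [ih, PySem.List.length_pySetD]

theorem union_merge (N : Nat) (p p2 : List Int) (cc : Int) (label : List Int)
    (comp : List (List Int)) (rk : Int → Nat)
    (hp : p.length = N) (hl : label.length = N) (hc : comp.length = N)
    (hwf : WFp p rk)
    (hLbR : ∀ j, InR N j → InR N (Lb label j))
    (hA4 : ∀ j k, InR N j → InR N k → (rootP p j = rootP p k ↔ Lb label j = Lb label k))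
    (hM : ∀ c, InR N c → ∀ j : Int, j ∈ PySem.List.pyGetD comp c [] ↔ (InR N j ∧ Lb label j = c))
    (hcc : cc = (((Finset.Icc (0:Int) ((N:Int)-1)).image (fun k => rootP p k)).card : Int))
    (h2len : p2.length = N) (hwf2 : WFp p2 rk)
    (h2roots : ∀ k, InR N k → rootP p2 k = rootP p k)
    (a b : Int) (ha : InR N a) (hb : InR N b)
    (ra' rb' aa bb : Int)
    (hper : (ra' = rootP p a ∧ rb' = rootP p b) ∨ (ra' = rootP p b ∧ rb' = rootP p a))
    (hpel : (aa = Lb label a ∧ bb = Lb label b) ∨ (aa = Lb label b ∧ bb = Lb label a))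
    (hne : Lb label a ≠ Lb label b) :
    QInv N (PySem.List.pySetD p2 rb' ra') (cc - 1)
      ((PySem.List.pyGetD comp bb []).foldl (fun lb x => PySem.List.pySetD lb x aa) label)
      (PySem.List.pySetD (PySem.List.pySetD comp aa
        (PySem.List.pyGetD comp aa [] ++ PySem.List.pyGetD comp bb [])) bb []) := by
  have haP : InR p.length a := by rw [hp]; exact ha
  have hbP : InR p.length b := by rw [hp]; exact hb
  have hrne : rootP p a ≠ rootP p b := fun h => hne ((hA4 a b ha hb).mp h)
  have hra'rb' : ra' ≠ rb' := by
    rcases hper with ⟨h1, h2⟩ | ⟨h1, h2⟩ <;> rw [h1, h2]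
    · exact hrne
    · exact fun h => hrne h.symm
  have haabb : aa ≠ bb := by
    rcases hpel with ⟨h1, h2⟩ | ⟨h1, h2⟩ <;> rw [h1, h2]
    · exact hne
    · exact fun h => hne h.symm
  have hinrA : InR N (rootP p a) := by
    have := root_inR p rk hwf a haP; rwa [hp] at this
  have hinrB : InR N (rootP p b) := by
    have := root_inR p rk hwf b hbP; rwa [hp] at this
  have hira' : InR N ra' := by rcases hper with ⟨h1, _⟩ | ⟨h1, _⟩ <;> rw [h1] <;> assumption
  have hirb' : InR N rb' := by rcases hper with ⟨_, h2⟩ | ⟨_, h2⟩ <;> rw [h2] <;> assumption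
  have hidemA : rootP p (rootP p a) = rootP p a := root_of_fix p _ (root_isFix p rk hwf a haP)
  have hidemB : rootP p (rootP p b) = rootP p b := root_of_fix p _ (root_isFix p rk hwf b hbP)
  have hfixa : qstep p2 ra' = ra' := by
    apply fix_of_root_eq_self p2 rk hwf2 ra' (by rw [h2len]; exact hira')
    rw [h2roots ra' hira']
    rcases hper with ⟨h1, _⟩ | ⟨h1, _⟩ <;> rw [h1] <;> assumption
  have hfixb : qstep p2 rb' = rb' := by
    apply fix_of_root_eq_self p2 rk hwf2 rb' (by rw [h2len]; exact hirb')
    rw [h2roots rb' hirb']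
    rcases hper with ⟨_, h2⟩ | ⟨_, h2⟩ <;> rw [h2] <;> assumption
  obtain ⟨⟨rk', hwfU⟩, hrootsU⟩ := union_set p2 rk hwf2 ra' rb'
    (by rw [h2len]; exact hira') (by rw [h2len]; exact hirb') hfixa hfixb hra'rb'
  have h3len : (PySem.List.pySetD p2 rb' ra').length = N := by
    rw [PySem.List.length_pySetD, h2len]
  have hr3 : ∀ j, InR N j → rootP (PySem.List.pySetD p2 rb' ra') j =
      if rootP p j = rb' then ra' else rootP p j := by
    intro j hj
    rw [hrootsU j (by rw [h2len]; exact hj), h2roots j hj]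
  have hbbIn : InR N bb := by
    rcases hpel with ⟨_, h2⟩ | ⟨_, h2⟩ <;> rw [h2]
    · exact hLbR b hb
    · exact hLbR a ha
  have haaIn : InR N aa := by
    rcases hpel with ⟨h1, _⟩ | ⟨h1, _⟩ <;> rw [h1]
    · exact hLbR a ha
    · exact hLbR b hb
  have hLmem : ∀ j : Int, j ∈ PySem.List.pyGetD comp bb [] ↔ (InR N j ∧ Lb label j = bb) :=
    hM bb hbbIn
  have hlab : ∀ j, InR N j →
      Lb ((PySem.List.pyGetD comp bb []).foldl (fun lb x => PySem.List.pySetD lb x aa) label) j =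
        if Lb label j = bb then aa else Lb label j := by
    intro j hj
    rw [foldl_pySetD_spec aa _ label j (by rw [hl]; exact hj)
      (fun x hx => by rw [hl]; exact ((hLmem x).mp hx).1)]
    by_cases hmem : j ∈ PySem.List.pyGetD comp bb []
    · rw [if_pos hmem, if_pos ((hLmem j).mp hmem).2]
    · rw [if_neg hmem, if_neg fun hlj => hmem ((hLmem j).mpr ⟨hj, hlj⟩)]
  have hlablen :
      ((PySem.List.pyGetD comp bb []).foldl (fun lb x => PySem.List.pySetD lb x aa) label).length = N := by
    rw [foldl_pySetD_length, hl]
  have hcomplen :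
      (PySem.List.pySetD (PySem.List.pySetD comp aa
        (PySem.List.pyGetD comp aa [] ++ PySem.List.pyGetD comp bb [])) bb []).length = N := by
    rw [PySem.List.length_pySetD, PySem.List.length_pySetD, hc]
  have hcget : ∀ c, InR N c →
      PySem.List.pyGetD (PySem.List.pySetD (PySem.List.pySetD comp aa
        (PySem.List.pyGetD comp aa [] ++ PySem.List.pyGetD comp bb [])) bb []) c [] =
        if c = bb then [] else if c = aa then
          (PySem.List.pyGetD comp aa [] ++ PySem.List.pyGetD comp bb [])
        else PySem.List.pyGetD comp c [] := by
    intro c hcIn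
    have hlen4 : (PySem.List.pySetD comp aa
        (PySem.List.pyGetD comp aa [] ++ PySem.List.pyGetD comp bb [])).length = comp.length :=
      PySem.List.length_pySetD _ _ _
    rw [pyGetD_pySetD_int _ bb [] c [] (by rw [hlen4, hc]; exact hbbIn) (by rw [hlen4, hc]; exact hcIn)]
    by_cases hcb : c = bb
    · rw [if_pos hcb, if_pos hcb]
    · rw [if_neg hcb, if_neg hcb,
        pyGetD_pySetD_int comp aa _ c [] (by rw [hc]; exact haaIn) (by rw [hc]; exact hcIn)]
  refine ⟨h3len, hlablen, hcomplen, ⟨rk', hwfU⟩, ?_, ?_, ?_, ?_⟩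
  · intro j hj
    rw [hlab j hj]
    split_ifs
    · exact haaIn
    · exact hLbR j hj
  · intro j k hj hk
    rw [hr3 j hj, hr3 k hk, hlab j hj, hlab k hk]
    rw [merge_eq_iff _ _ ra' rb' hra'rb', merge_eq_iff _ _ aa bb haabb]
    have e1 : ∀ x, InR N x →
        ((rootP p x = ra' ∨ rootP p x = rb') ↔ (Lb label x = aa ∨ Lb label x = bb)) := by
      intro x hx
      have u1 := hA4 x a hx ha
      have u2 := hA4 x b hx hb
      rcases hper with ⟨h1, h2⟩ | ⟨h1, h2⟩ <;> rcases hpel with ⟨g1, g2⟩ | ⟨g1, g2⟩ <;>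
        rw [h1, h2, g1, g2]
      · exact or_congr u1 u2
      · exact (or_congr u1 u2).trans or_comm
      · exact (or_congr u2 u1).trans or_comm
      · exact or_congr u2 u1
    have e2 := hA4 j k hj hk
    have e3 := e1 j hj
    have e4 := e1 k hk
    exact ⟨fun h => h.elim (fun h => Or.inl (e2.mp h)) (fun h => Or.inr ⟨e3.mp h.1, e4.mp h.2⟩),
           fun h => h.elim (fun h => Or.inl (e2.mpr h)) (fun h => Or.inr ⟨e3.mpr h.1, e4.mpr h.2⟩)⟩
  · intro c hcIn j
    rw [hcget c hcIn]
    by_cases hcb : c = bb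
    · rw [if_pos hcb]
      simp only [List.not_mem_nil, false_iff]
      rintro ⟨hj, hlj⟩
      rw [hlab j hj] at hlj
      by_cases hlb : Lb label j = bb
      · rw [if_pos hlb] at hlj; exact haabb (hlj.trans hcb)
      · rw [if_neg hlb] at hlj; exact hlb (hlj.trans hcb)
    · rw [if_neg hcb]
      by_cases hca : c = aa
      · rw [if_pos hca, List.mem_append, hM aa haaIn j, hLmem j]
        constructor
        · rintro (⟨hj, hlj⟩ | ⟨hj, hlj⟩) <;> refine ⟨hj, ?_⟩ <;> rw [hlab j hj]
          · rw [if_neg (by rw [hlj]; exact haabb), hlj, hca]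
          · rw [if_pos hlj, hca]
        · rintro ⟨hj, hlj⟩
          rw [hlab j hj] at hlj
          by_cases hlb : Lb label j = bb
          · exact Or.inr ⟨hj, hlb⟩
          · rw [if_neg hlb] at hlj
            exact Or.inl ⟨hj, by rw [hlj, hca]⟩
      · rw [if_neg hca, hM c hcIn j]
        constructor
        · rintro ⟨hj, hlj⟩
          refine ⟨hj, ?_⟩
          rw [hlab j hj, if_neg (by rw [hlj]; exact hcb), hlj]
        · rintro ⟨hj, hlj⟩
          rw [hlab j hj] at hlj
          by_cases hlb : Lb label j = bb
          · rw [if_pos hlb] at hlj; exact absurd hlj.symm hca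
          · rw [if_neg hlb] at hlj; exact ⟨hj, hlj⟩
  · have hrb'S : rb' ∈ (Finset.Icc (0:Int) ((N:Int)-1)).image (fun k => rootP p k) := by
      rcases hper with ⟨_, h2⟩ | ⟨_, h2⟩ <;> rw [h2] <;> apply Finset.mem_image.mpr
      · exact ⟨b, by rw [Finset.mem_Icc]; exact ⟨hb.1, by have := hb.2; omega⟩, rfl⟩
      · exact ⟨a, by rw [Finset.mem_Icc]; exact ⟨ha.1, by have := ha.2; omega⟩, rfl⟩
    have hra'S : ra' ∈ (Finset.Icc (0:Int) ((N:Int)-1)).image (fun k => rootP p k) := by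
      rcases hper with ⟨h1, _⟩ | ⟨h1, _⟩ <;> rw [h1] <;> apply Finset.mem_image.mpr
      · exact ⟨a, by rw [Finset.mem_Icc]; exact ⟨ha.1, by have := ha.2; omega⟩, rfl⟩
      · exact ⟨b, by rw [Finset.mem_Icc]; exact ⟨hb.1, by have := hb.2; omega⟩, rfl⟩
    have himg : (Finset.Icc (0:Int) ((N:Int)-1)).image (fun k => rootP (PySem.List.pySetD p2 rb' ra') k) =
        ((Finset.Icc (0:Int) ((N:Int)-1)).image (fun k => rootP p k)).erase rb' := by
      apply Finset.ext
      intro x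
      simp only [Finset.mem_image, Finset.mem_erase]
      constructor
      · rintro ⟨y, hy, hxy⟩
        have hyIn : InR N y := by rw [Finset.mem_Icc] at hy; exact ⟨hy.1, by omega⟩
        rw [hr3 y hyIn] at hxy
        by_cases hyr : rootP p y = rb'
        · rw [if_pos hyr] at hxy
          rw [← hxy]
          exact ⟨hra'rb', Finset.mem_image.mp hra'S⟩
        · rw [if_neg hyr] at hxy
          exact ⟨by rw [← hxy]; exact hyr, ⟨y, hy, hxy⟩⟩
      · rintro ⟨hxne, y, hy, hxy⟩
        have hyIn : InR N y := by rw [Finset.mem_Icc] at hy; exact ⟨hy.1, by omega⟩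
        refine ⟨y, hy, ?_⟩
        rw [hr3 y hyIn, if_neg (by rw [hxy]; exact hxne), hxy]
    rw [himg, Finset.card_erase_of_mem hrb'S]
    have hpos : 0 < ((Finset.Icc (0:Int) ((N:Int)-1)).image (fun k => rootP p k)).card :=
      Finset.card_pos.mpr ⟨rb', hrb'S⟩
    omega



-- transporting QInv along a parent list with the same roots (path compression only)
theorem QInv_transfer (N : Nat) (p p' : List Int) (cc : Int) (label : List Int)
    (comp : List (List Int)) (h : QInv N p cc label comp) (hlen : p'.length = N)
    (hwf' : ∃ rk, WFp p' rk) (hroots : ∀ j, InR N j → rootP p' j = rootP p j) :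
    QInv N p' cc label comp := by
  obtain ⟨hp, hl, hc, _, hLbR, hA4, hM, hcc⟩ := h
  refine ⟨hlen, hl, hc, hwf', hLbR, ?_, hM, ?_⟩
  · intro j k hj hk
    rw [hroots j hj, hroots k hk]
    exact hA4 j k hj hk
  · rw [hcc]
    congr 2
    apply Finset.image_congr
    intro x hx
    rw [Finset.coe_Icc, Set.mem_Icc] at hx
    exact (hroots x ⟨hx.1, by omega⟩).symm

def dsuStep (st : List Int × List Int × Int) (e : Int × Int) : List Int × List Int × Int :=
  dsuUnion st.1 st.2.1 st.2.2 (e.1 - 1) (e.2 - 1)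

def qfStep (st : List Int × List (List Int)) (e : Int × Int) : List Int × List (List Int) :=
  qfUnion st.1 st.2 (e.1 - 1) (e.2 - 1)

-- one union step of A versus one merge step of B preserves the coupling invariant
theorem union_keeps_Inv (N : Nat) (p sz : List Int) (cc : Int) (label : List Int)
    (comp : List (List Int)) (hinv : QInv N p cc label comp) (a b : Int)
    (ha : InR N a) (hb : InR N b) :
    QInv N (dsuUnion p sz cc a b).1 (dsuUnion p sz cc a b).2.2
      (qfUnion label comp a b).1 (qfUnion label comp a b).2 := by
  obtain ⟨hp, hl, hc, ⟨rk, hwf⟩, hLbR, hA4, hM, hcc⟩ := hinv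
  have haP : InR p.length a := by rw [hp]; exact ha
  have hbP : InR p.length b := by rw [hp]; exact hb
  obtain ⟨p1, hfa, hlen1, hwf1, hroots1⟩ := dsuFind_spec p rk hwf a haP
  obtain ⟨p2, hfb, hlen2, hwf2, hroots2⟩ := dsuFind_spec p1 rk hwf1 b (by rw [hlen1]; exact hbP)
  have hrb1 : rootP p1 b = rootP p b := hroots1 b hbP
  have h2len : p2.length = N := by rw [hlen2, hlen1, hp]
  have h2roots : ∀ k, InR N k → rootP p2 k = rootP p k := by
    intro k hk
    rw [hroots2 k (by rw [hlen1, hp]; exact hk), hroots1 k (by rw [hp]; exact hk)]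
  have hU : dsuUnion p sz cc a b =
      (if rootP p a = rootP p b then (p2, sz, cc)
       else
         let s := if PySem.List.pyGetD sz (rootP p a) 0 < PySem.List.pyGetD sz (rootP p b) 0
                  then (rootP p b, rootP p a) else (rootP p a, rootP p b)
         (PySem.List.pySetD p2 s.2 s.1,
          PySem.List.pySetD sz s.1 (PySem.List.pyGetD sz s.1 0 + PySem.List.pyGetD sz s.2 0),
          cc - 1)) := by
    simp only [dsuUnion, hfa, hfb, hrb1]
  by_cases hr : rootP p a = rootP p b
  · have hlb : Lb label a = Lb label b := (hA4 a b ha hb).mp hr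
    have hQ : qfUnion label comp a b = (label, comp) := by
      simp only [qfUnion, Lb] at hlb ⊢
      rw [if_pos hlb]
    rw [hU, hQ, if_pos hr]
    exact QInv_transfer N p p2 cc label comp ⟨hp, hl, hc, ⟨rk, hwf⟩, hLbR, hA4, hM, hcc⟩
      h2len ⟨rk, hwf2⟩ h2roots
  · have hlb : Lb label a ≠ Lb label b := fun h => hr ((hA4 a b ha hb).mpr h)
    have hQ : qfUnion label comp a b =
        (let t := if (PySem.List.pyGetD comp (Lb label a) []).length <
                      (PySem.List.pyGetD comp (Lb label b) []).length
                  then (Lb label b, Lb label a) else (Lb label a, Lb label b)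
         ((PySem.List.pyGetD comp t.2 []).foldl (fun lb x => PySem.List.pySetD lb x t.1) label,
          PySem.List.pySetD (PySem.List.pySetD comp t.1
            (PySem.List.pyGetD comp t.1 [] ++ PySem.List.pyGetD comp t.2 [])) t.2 [])) := by
      simp only [qfUnion, Lb] at hlb ⊢
      rw [if_neg hlb]
    rw [hU, hQ, if_neg hr]
    have base := union_merge N p p2 cc label comp rk hp hl hc hwf hLbR hA4 hM hcc
      h2len hwf2 h2roots a b ha hb
    by_cases hsz : PySem.List.pyGetD sz (rootP p a) 0 < PySem.List.pyGetD sz (rootP p b) 0 <;>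
      by_cases hcl : (PySem.List.pyGetD comp (Lb label a) []).length <
          (PySem.List.pyGetD comp (Lb label b) []).length <;>
      simp only [if_pos, hsz, hcl, if_false]
    · exact base (rootP p b) (rootP p a) (Lb label b) (Lb label a)
        (Or.inr ⟨rfl, rfl⟩) (Or.inr ⟨rfl, rfl⟩) hlb
    · exact base (rootP p b) (rootP p a) (Lb label a) (Lb label b)
        (Or.inr ⟨rfl, rfl⟩) (Or.inl ⟨rfl, rfl⟩) hlb
    · exact base (rootP p a) (rootP p b) (Lb label b) (Lb label a)
        (Or.inl ⟨rfl, rfl⟩) (Or.inr ⟨rfl, rfl⟩) hlb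
    · exact base (rootP p a) (rootP p b) (Lb label a) (Lb label b)
        (Or.inl ⟨rfl, rfl⟩) (Or.inl ⟨rfl, rfl⟩) hlb

-- folding a list of in-range edges through both structures preserves the invariant
theorem fold_couple (N : Nat) :
    ∀ (es : List (Int × Int)) (p sz : List Int) (cc : Int) (label : List Int)
      (comp : List (List Int)),
      QInv N p cc label comp →
      (∀ e ∈ es, 1 ≤ e.1 ∧ e.1 ≤ (N:Int) ∧ 1 ≤ e.2 ∧ e.2 ≤ (N:Int)) →
      QInv N (es.foldl dsuStep (p, sz, cc)).1 (es.foldl dsuStep (p, sz, cc)).2.2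
        (es.foldl qfStep (label, comp)).1 (es.foldl qfStep (label, comp)).2 := by
  intro es
  induction es with
  | nil => intro p sz cc label comp h _; exact h
  | cons e es ih =>
    intro p sz cc label comp h hval
    have he := hval e (by simp)
    have hstep := union_keeps_Inv N p sz cc label comp h (e.1 - 1) (e.2 - 1)
      ⟨by omega, by omega⟩ ⟨by omega, by omega⟩
    simp only [List.foldl_cons]
    have h1 : dsuStep (p, sz, cc) e =
        ((dsuStep (p, sz, cc) e).1, (dsuStep (p, sz, cc) e).2.1, (dsuStep (p, sz, cc) e).2.2) := rfl
    have h2 : qfStep (label, comp) e =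
        ((qfStep (label, comp) e).1, (qfStep (label, comp) e).2) := rfl
    rw [h1, h2]
    exact ih _ _ _ _ _ hstep (fun x hx => hval x (by simp [hx]))

-- the initial states of A and B satisfy the invariant
theorem init_inv (n : Int) (hn : 2 ≤ n) :
    QInv n.toNat (PySem.List.pyRange 0 n 1) n (PySem.List.pyRange 0 n 1)
      ((PySem.List.pyRange 0 n 1).map (fun i => [i])) := by
  have hlen : (PySem.List.pyRange 0 n 1).length = n.toNat := by
    rw [PySem.List.length_pyRange_one]; omega
  have hq : ∀ a : Int, InR n.toNat a → qstep (PySem.List.pyRange 0 n 1) a = a := by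
    intro a ha
    obtain ⟨ha0, ha1⟩ := ha
    have h1 : a < ((PySem.List.pyRange 0 n 1).length : Int) := by rw [hlen]; omega
    rw [qstep, PySem.List.pyGetD_eq_getElem _ _ ha0 h1, PySem.List.getElem_pyRange_one]
    omega
  have hroot : ∀ a : Int, InR n.toNat a → rootP (PySem.List.pyRange 0 n 1) a = a := by
    intro a ha
    exact root_of_fix _ a (hq a ha)
  have hwf : WFp (PySem.List.pyRange 0 n 1) (fun _ => 0) := by
    constructor
    · intro a ha
      rw [hlen] at ha
      rw [hq a ha, hlen]
      exact ha
    · intro a ha hne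
      rw [hlen] at ha
      exact absurd (hq a ha) hne
  refine ⟨hlen, hlen, by simp [hlen], ⟨fun _ => 0, hwf⟩, ?_, ?_, ?_, ?_⟩
  · intro j hj
    rw [Lb, ← qstep, hq j hj]
    exact hj
  · intro j k hj hk
    rw [hroot j hj, hroot k hk, Lb, Lb, ← qstep, ← qstep, hq j hj, hq k hk]
  · intro c hc j
    have hcomp : PySem.List.pyGetD ((PySem.List.pyRange 0 n 1).map (fun i => [i])) c [] = [c] :=
      PySem.List.pyGetD_map_pyRange_of_nonneg (fun i => [i]) n c [] hc.1 (by have := hc.2; omega)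
    rw [hcomp]
    simp only [List.mem_singleton]
    constructor
    · rintro rfl
      exact ⟨hc, by rw [Lb, ← qstep, hq j hc]⟩
    · rintro ⟨hj, hlj⟩
      rw [Lb, ← qstep, hq j hj] at hlj
      exact hlj
  · have himg : (Finset.Icc (0:Int) ((n.toNat:Int)-1)).image
        (fun k => rootP (PySem.List.pyRange 0 n 1) k) = Finset.Icc (0:Int) ((n.toNat:Int)-1) := by
      have : (Finset.Icc (0:Int) ((n.toNat:Int)-1)).image
          (fun k => rootP (PySem.List.pyRange 0 n 1) k) =
          (Finset.Icc (0:Int) ((n.toNat:Int)-1)).image (fun k => k) := by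
        apply Finset.image_congr
        intro x hx
        rw [Finset.coe_Icc, Set.mem_Icc] at hx
        exact hroot x ⟨hx.1, by omega⟩
      rw [this, Finset.image_id']
    rw [himg, Int.card_Icc]
    omega

-- final checks agree: component count 1 iff every label equals label[0]
theorem final_eq (N : Nat) (p : List Int) (cc : Int) (label : List Int)
    (comp : List (List Int)) (hinv : QInv N p cc label comp) (hN : 1 ≤ N) :
    (cc = 1) ↔ (label.all (fun t => t == PySem.List.pyGetD label 0 0) = true) := by
  obtain ⟨hp, hl, hc, ⟨rk, hwf⟩, hLbR, hA4, hM, hcc⟩ := hinv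
  have h0In : InR N 0 := ⟨le_refl 0, by omega⟩
  have hL0 : PySem.List.pyGetD label 0 0 = Lb label 0 := rfl
  have hmem : ∀ j : Nat, j < N → Lb label (j : Int) ∈ label := by
    intro j hj
    have : Lb label (j : Int) = label[j]'(by omega) := by
      rw [Lb, PySem.List.pyGetD_eq_getElem _ _ (by omega) (by rw [hl]; exact_mod_cast hj)]
      simp
    rw [this]
    exact List.getElem_mem _
  have hall : (label.all (fun t => t == PySem.List.pyGetD label 0 0) = true) ↔
      (∀ j : Int, InR N j → Lb label j = Lb label 0) := by
    rw [List.all_eq_true]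
    constructor
    · intro h j hj
      obtain ⟨hj0, hj1⟩ := hj
      have hjN : j.toNat < N := by omega
      have h1 : Lb label j = Lb label (j.toNat : Int) := by congr 1; omega
      have h2 := h _ (hmem j.toNat hjN)
      rw [beq_iff_eq, hL0] at h2
      rw [h1]
      exact h2
    · intro h t ht
      rw [beq_iff_eq, hL0]
      obtain ⟨k, hk, rfl⟩ := List.mem_iff_getElem.mp ht
      have hkN : k < N := by rw [hl] at hk; exact hk
      have h1 : label[k] = Lb label (k : Int) := by
        rw [Lb, PySem.List.pyGetD_eq_getElem _ _ (by omega) (by rw [hl]; exact_mod_cast hkN)]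
        simp
      rw [h1]
      exact h (k : Int) ⟨by omega, by exact_mod_cast hkN⟩
  rw [hall, hcc]
  have h0mem : (0:Int) ∈ Finset.Icc (0:Int) ((N:Int)-1) := by
    rw [Finset.mem_Icc]; omega
  constructor
  · intro h j hj
    have hcard : ((Finset.Icc (0:Int) ((N:Int)-1)).image (fun k => rootP p k)).card = 1 := by
      omega
    obtain ⟨x, hx⟩ := Finset.card_eq_one.mp hcard
    have hj' : rootP p j ∈ (Finset.Icc (0:Int) ((N:Int)-1)).image (fun k => rootP p k) := by
      apply Finset.mem_image.mpr
      exact ⟨j, by rw [Finset.mem_Icc]; exact ⟨hj.1, by have := hj.2; omega⟩, rfl⟩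
    have h0' : rootP p 0 ∈ (Finset.Icc (0:Int) ((N:Int)-1)).image (fun k => rootP p k) := by
      apply Finset.mem_image.mpr
      exact ⟨0, h0mem, rfl⟩
    rw [hx, Finset.mem_singleton] at hj' h0'
    exact (hA4 j 0 hj h0In).mp (hj'.trans h0'.symm)
  · intro h
    have : (Finset.Icc (0:Int) ((N:Int)-1)).image (fun k => rootP p k) = {rootP p 0} := by
      apply Finset.eq_singleton_iff_unique_mem.mpr
      constructor
      · exact Finset.mem_image.mpr ⟨0, h0mem, rfl⟩
      · intro x hx
        obtain ⟨y, hy, rfl⟩ := Finset.mem_image.mp hx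
        rw [Finset.mem_Icc] at hy
        have hyIn : InR N y := ⟨hy.1, by omega⟩
        exact (hA4 y 0 hyIn h0In).mpr (h y hyIn)
    rw [this]
    simp

-- ---------- parsing layer: one edge line, classified ----------
-- none = invalid line; some none = valid self-loop; some (some (u,v)) = valid edge
def stepParse (n : Int) (s : String) : Option (Option (Int × Int)) :=
  let parts := (PySem.Str.split? s " ").getD []
  if parts.length ≠ 3 then none
  else
    match PySem.Int.ofStr? (PySem.List.pyGetD parts 0 ""), PySem.Int.ofStr? (PySem.List.pyGetD parts 1 ""),
          PySem.Int.ofStr? (PySem.List.pyGetD parts 2 "") with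
    | some u, some v, some w =>
      if ¬ (1 ≤ u ∧ u ≤ n ∧ 1 ≤ v ∧ v ≤ n) then none
      else if ¬ (-(10^9 : Int) ≤ w ∧ w ≤ 10^9) then none
      else if u ≠ v then some (some (u, v)) else some none
    | _, _, _ => none

-- structural (string-list) version of A's edge loop, used only in the proofs
def edgeLoopA' (n : Int) : List String → (List Int × List Int × Int) → Option (List Int × List Int × Int)
  | [], st => some st
  | ln :: ss, st =>
    match stepParse n ln with
    | none => none
    | some none => edgeLoopA' n ss st
    | some (some e) => edgeLoopA' n ss (dsuStep st e)

theorem stepA (lines : List String) (idx n j : Int) (st : List Int × List Int × Int) :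
    edgeStepA lines idx n j st =
      match stepParse n (PySem.List.pyGetD lines (idx + j) "") with
      | none => none
      | some none => some st
      | some (some e) => some (dsuStep st e) := by
  unfold edgeStepA stepParse dsuStep
  generalize ((PySem.Str.split? (PySem.List.pyGetD lines (idx + j) "") " ").getD []) = parts
  by_cases h3 : parts.length ≠ 3
  · rw [if_pos h3, if_pos h3]
  · rw [if_neg h3, if_neg h3]
    cases hu : PySem.Int.ofStr? (PySem.List.pyGetD parts 0 "") with
    | none => rfl
    | some u =>
      cases hv : PySem.Int.ofStr? (PySem.List.pyGetD parts 1 "") with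
      | none => rfl
      | some v =>
        cases hw : PySem.Int.ofStr? (PySem.List.pyGetD parts 2 "") with
        | none => rfl
        | some w =>
          simp only []
          by_cases h1 : ¬ (1 ≤ u ∧ u ≤ n ∧ 1 ≤ v ∧ v ≤ n)
          · rw [if_pos h1, if_pos h1]
          · rw [if_neg h1, if_neg h1]
            by_cases h2 : ¬ (-(10^9 : Int) ≤ w ∧ w ≤ 10^9)
            · rw [if_pos h2, if_pos h2]
            · rw [if_neg h2, if_neg h2]
              by_cases huv : u ≠ v
              · rw [if_pos huv, if_pos huv]
              · rw [if_neg huv, if_neg huv]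

theorem stepALoop (lines : List String) (idx n j : Int) (js : List Int)
    (st : List Int × List Int × Int) :
    edgeLoopA lines idx n (j :: js) st =
      match stepParse n (PySem.List.pyGetD lines (idx + j) "") with
      | none => none
      | some none => edgeLoopA lines idx n js st
      | some (some e) => edgeLoopA lines idx n js (dsuStep st e) := by
  rw [edgeLoopA, stepA]
  cases stepParse n (PySem.List.pyGetD lines (idx + j) "") with
  | none => rfl
  | some o => cases o <;> rfl

theorem intsOf_len : ∀ (parts : List String) (vs : List Int),
    intsOf parts = some vs → vs.length = parts.length := by
  intro parts
  induction parts with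
  | nil => intro vs h; simp [intsOf, List.mapM_nil] at h; simp [← h]
  | cons a t ih =>
    intro vs h
    rw [intsOf, List.mapM_cons] at h
    cases hx : PySem.Int.ofStr? a <;> rw [hx] at h
    · simp at h
    · cases ht : t.mapM PySem.Int.ofStr? <;> rw [ht] at h
      · simp at h
      · simp at h
        rw [← h]
        simp [ih _ ht]

theorem intsOf_pair (a b : String) : intsOf [a, b] =
    match PySem.Int.ofStr? a, PySem.Int.ofStr? b with
    | some u, some v => some [u, v]
    | _, _ => none := by
  rw [intsOf, List.mapM_cons, List.mapM_cons, List.mapM_nil]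
  cases PySem.Int.ofStr? a <;> cases PySem.Int.ofStr? b <;> rfl

theorem intsOf_triple (a b c : String) : intsOf [a, b, c] =
    match PySem.Int.ofStr? a, PySem.Int.ofStr? b, PySem.Int.ofStr? c with
    | some u, some v, some w => some [u, v, w]
    | _, _, _ => none := by
  rw [intsOf, List.mapM_cons, List.mapM_cons, List.mapM_cons, List.mapM_nil]
  cases PySem.Int.ofStr? a <;> cases PySem.Int.ofStr? b <;> cases PySem.Int.ofStr? c <;> rfl

theorem edgesOf_cons (n : Int) (ln : String) (ss : List String) (acc : List (Int × Int)) :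
    edgesOf n (ln :: ss) acc =
      match stepParse n ln with
      | none => none
      | some none => edgesOf n ss acc
      | some (some e) => edgesOf n ss (acc ++ [e]) := by
  rw [edgesOf, stepParse]
  generalize ((PySem.Str.split? ln " ").getD []) = parts
  match parts with
  | [] => rfl
  | [a] =>
    rw [show intsOf [a] = (PySem.Int.ofStr? a).map (fun x => [x]) from by
      rw [intsOf, List.mapM_cons, List.mapM_nil]; cases PySem.Int.ofStr? a <;> rfl]
    cases PySem.Int.ofStr? a <;> rfl
  | [a, b] =>
    rw [intsOf_pair]
    cases PySem.Int.ofStr? a <;> cases PySem.Int.ofStr? b <;> rfl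
  | [a, b, c] =>
    have e0 : PySem.List.pyGetD [a, b, c] 0 "" = a := rfl
    have e1 : PySem.List.pyGetD [a, b, c] 1 "" = b := rfl
    have e2 : PySem.List.pyGetD [a, b, c] 2 "" = c := rfl
    rw [intsOf_triple, e0, e1, e2]
    cases hu : PySem.Int.ofStr? a with
    | none => rfl
    | some u =>
      cases hv : PySem.Int.ofStr? b with
      | none => rfl
      | some v =>
        cases hw : PySem.Int.ofStr? c with
        | none => rfl
        | some w =>
          rw [if_neg (by simp : ¬ (([a, b, c] : List String).length ≠ 3))]
          simp only []
          by_cases h1 : 1 ≤ u ∧ u ≤ n ∧ 1 ≤ v ∧ v ≤ n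
          · by_cases h2 : -(10^9 : Int) ≤ w ∧ w ≤ 10^9
            · rw [if_pos (show 1 ≤ u ∧ u ≤ n ∧ 1 ≤ v ∧ v ≤ n ∧ -(10^9 : Int) ≤ w ∧ w ≤ 10^9 by tauto),
                if_neg (show ¬¬(1 ≤ u ∧ u ≤ n ∧ 1 ≤ v ∧ v ≤ n) by tauto),
                if_neg (show ¬¬(-(10^9 : Int) ≤ w ∧ w ≤ 10^9) by tauto)]
              by_cases huv : u ≠ v
              · rw [if_pos huv, if_pos huv]
              · rw [if_neg huv, if_neg huv]
            · rw [if_neg (show ¬(1 ≤ u ∧ u ≤ n ∧ 1 ≤ v ∧ v ≤ n ∧ -(10^9 : Int) ≤ w ∧ w ≤ 10^9) by tauto),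
                if_neg (show ¬¬(1 ≤ u ∧ u ≤ n ∧ 1 ≤ v ∧ v ≤ n) by tauto),
                if_pos (show ¬(-(10^9 : Int) ≤ w ∧ w ≤ 10^9) from h2)]
          · rw [if_neg (show ¬(1 ≤ u ∧ u ≤ n ∧ 1 ≤ v ∧ v ≤ n ∧ -(10^9 : Int) ≤ w ∧ w ≤ 10^9) by tauto),
              if_pos (show ¬(1 ≤ u ∧ u ≤ n ∧ 1 ≤ v ∧ v ≤ n) from h1)]
  | a :: b :: c :: d :: t =>
    cases hI : intsOf (a :: b :: c :: d :: t) with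
    | none => rfl
    | some vs =>
      have hlen := intsOf_len _ _ hI
      simp only [List.length_cons] at hlen
      match vs, hlen with
      | v1 :: v2 :: v3 :: v4 :: vt, _ => rfl

theorem edgesOf_acc (n : Int) : ∀ (ss : List String) (acc : List (Int × Int)),
    edgesOf n ss acc = (edgesOf n ss []).map (fun es => acc ++ es) := by
  intro ss
  induction ss with
  | nil => intro acc; simp [edgesOf]
  | cons ln ss ih =>
    intro acc
    rw [edgesOf_cons, edgesOf_cons]
    cases stepParse n ln with
    | none => rfl
    | some o =>
      cases o with
      | none => exact ih acc
      | some e =>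
        simp only [List.nil_append]
        rw [ih (acc ++ [e]), ih [e]]
        cases edgesOf n ss [] <;> simp

theorem stepParse_valid (n : Int) (s : String) (e : Int × Int)
    (h : stepParse n s = some (some e)) :
    1 ≤ e.1 ∧ e.1 ≤ n ∧ 1 ≤ e.2 ∧ e.2 ≤ n := by
  rw [stepParse] at h
  generalize hp : ((PySem.Str.split? s " ").getD []) = parts at h
  by_cases h3 : parts.length ≠ 3
  · rw [if_pos h3] at h; simp at h
  · rw [if_neg h3] at h
    cases hu : PySem.Int.ofStr? (PySem.List.pyGetD parts 0 "") with
    | none => rw [hu] at h; simp at h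
    | some u =>
      rw [hu] at h
      cases hv : PySem.Int.ofStr? (PySem.List.pyGetD parts 1 "") with
      | none => rw [hv] at h; simp at h
      | some v =>
        rw [hv] at h
        cases hw : PySem.Int.ofStr? (PySem.List.pyGetD parts 2 "") with
        | none => rw [hw] at h; simp at h
        | some w =>
          rw [hw] at h
          simp only [] at h
          by_cases h1 : ¬ (1 ≤ u ∧ u ≤ n ∧ 1 ≤ v ∧ v ≤ n)
          · rw [if_pos h1] at h; simp at h
          · rw [if_neg h1] at h
            by_cases h2 : ¬ (-(10^9 : Int) ≤ w ∧ w ≤ 10^9)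
            · rw [if_pos h2] at h; simp at h
            · rw [if_neg h2] at h
              by_cases huv : u ≠ v
              · rw [if_pos huv] at h
                simp only [Option.some.injEq] at h
                rw [← h]
                rw [not_not] at h1
                exact ⟨h1.1, h1.2.1, h1.2.2.1, h1.2.2.2⟩
              · rw [if_neg huv] at h; simp at h

theorem edgesOf_valid (n : Int) : ∀ (ss : List String) (acc es : List (Int × Int)),
    edgesOf n ss acc = some es →
    (∀ e ∈ acc, 1 ≤ e.1 ∧ e.1 ≤ n ∧ 1 ≤ e.2 ∧ e.2 ≤ n) →
    ∀ e ∈ es, 1 ≤ e.1 ∧ e.1 ≤ n ∧ 1 ≤ e.2 ∧ e.2 ≤ n := by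
  intro ss
  induction ss with
  | nil =>
    intro acc es h hacc
    rw [edgesOf] at h
    cases h
    exact hacc
  | cons ln ss ih =>
    intro acc es h hacc
    rw [edgesOf_cons] at h
    cases hsp : stepParse n ln <;> rw [hsp] at h
    · simp at h
    · rename_i o
      cases o with
      | none => exact ih acc es h hacc
      | some e =>
        refine ih (acc ++ [e]) es h ?_
        intro x hx
        rcases List.mem_append.mp hx with hx | hx
        · exact hacc x hx
        · rw [List.mem_singleton.mp hx]
          exact stepParse_valid n ln e hsp

theorem stageA' (n : Int) : ∀ (ss : List String) (st : List Int × List Int × Int),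
    edgeLoopA' n ss st = (edgesOf n ss []).map (fun es => es.foldl dsuStep st) := by
  intro ss
  induction ss with
  | nil => intro st; rfl
  | cons ln ss ih =>
    intro st
    rw [edgeLoopA', edgesOf_cons]
    cases stepParse n ln with
    | none => rfl
    | some o =>
      cases o with
      | none => exact ih st
      | some e =>
        simp only [List.nil_append]
        rw [ih (dsuStep st e), edgesOf_acc n ss [e]]
        cases edgesOf n ss [] <;> simp

theorem edgeA_shift (lines : List String) (idx n : Int) :
    ∀ (ss : List String) (jstart : Int) (st : List Int × List Int × Int),
      (∀ (k : Nat), k < ss.length → PySem.List.pyGetD lines (idx + (jstart + (k:Int))) "" = ss[k]!) →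
      edgeLoopA lines idx n (PySem.List.pyRange jstart (jstart + (ss.length:Int)) 1) st =
        edgeLoopA' n ss st := by
  intro ss
  induction ss with
  | nil =>
    intro jstart st _
    rw [show jstart + ((([] : List String).length : Nat) : Int) = jstart by simp,
      PySem.List.pyRange_one_eq_nil (le_refl jstart)]
    rfl
  | cons ln ss ih =>
    intro jstart st hh
    have hb : jstart + (((ln :: ss).length : Nat) : Int) = (jstart + 1) + (ss.length : Int) := by
      simp [List.length_cons]; omega
    rw [hb, PySem.List.pyRange_one_cons (by omega : jstart < (jstart + 1) + (ss.length : Int))]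
    rw [stepALoop]
    have h0 : PySem.List.pyGetD lines (idx + jstart) "" = ln := by
      have := hh 0 (by simp)
      simpa using this
    rw [h0, edgeLoopA']
    cases stepParse n ln with
    | none => rfl
    | some o =>
      have hh' : ∀ (k : Nat), k < ss.length →
          PySem.List.pyGetD lines (idx + ((jstart + 1) + (k:Int))) "" = ss[k]! := by
        intro k hk
        have := hh (k + 1) (by simp; omega)
        rw [show idx + (jstart + ((k:Nat) + 1 : Nat)) = idx + ((jstart + 1) + (k:Int)) by push_cast; ring] at this
        simpa using this
      cases o with
      | none => exact ih (jstart + 1) st hh'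
      | some e => exact ih (jstart + 1) (dsuStep st e) hh'

-- one accepted/rejected case of A versus one round of B on the corresponding suffix
theorem head_case (lines : List String) (idx : Int) (h0 : 0 ≤ idx)
    (hlt : idx < (lines.length : Int)) :
    ((parse_one_case lines idx).1 = false ∧ caseLoopB (lines.drop idx.toNat) = false) ∨
    (∃ m : Int, 1 ≤ m ∧ parse_one_case lines idx = (true, idx + 1 + m) ∧
      caseLoopB (lines.drop idx.toNat) = caseLoopB (lines.drop (idx.toNat + 1 + m.toNat))) := by
  have hidx : idx.toNat < lines.length := by omega
  have hdrop : lines.drop idx.toNat = lines[idx.toNat] :: lines.drop (idx.toNat + 1) :=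
    List.drop_eq_getElem_cons hidx
  have hfst : PySem.List.pyGetD lines idx "" = lines[idx.toNat] :=
    PySem.List.pyGetD_eq_getElem lines "" h0 hlt
  rw [hdrop]
  unfold parse_one_case
  rw [if_neg (by omega : ¬ ((lines.length : Int) ≤ idx)), hfst, caseLoopB]
  generalize hparts : ((PySem.Str.split? lines[idx.toNat] " ").getD []) = parts
  by_cases h2 : parts.length ≠ 2
  · rw [if_pos h2]
    left
    refine ⟨rfl, ?_⟩
    cases hI : intsOf parts with
    | none => rfl
    | some vs =>
      have hlenv := intsOf_len _ _ hI
      rcases vs with _ | ⟨x, _ | ⟨y, _ | ⟨z, t⟩⟩⟩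
      · rfl
      · rfl
      · exfalso; apply h2; rw [← hlenv]; rfl
      · rfl
  · rw [if_neg h2]
    rw [not_not] at h2
    obtain ⟨a, b, rfl⟩ := List.length_eq_two.mp h2
    have ea : PySem.List.pyGetD [a, b] 0 "" = a := rfl
    have eb : PySem.List.pyGetD [a, b] 1 "" = b := rfl
    rw [ea, eb, intsOf_pair]
    cases ha' : PySem.Int.ofStr? a with
    | none => left; exact ⟨rfl, rfl⟩
    | some nn =>
      cases hb' : PySem.Int.ofStr? b with
      | none => left; exact ⟨rfl, rfl⟩
      | some mm =>
        simp only []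
        set body := lines.drop (idx.toNat + 1) with hbody
        have hblen : (body.length : Int) = (lines.length : Int) - (idx.toNat + 1) := by
          rw [hbody, List.length_drop]
          omega
        by_cases hc1 : 2 ≤ nn ∧ nn ≤ 2 * 10^5
        case neg =>
          rw [if_pos (show ¬ (2 ≤ nn ∧ nn ≤ 2 * 10^5) from hc1),
            if_neg (show ¬ ((2 ≤ nn ∧ nn ≤ 2 * 10^5 ∧ nn - 1 ≤ mm ∧ mm ≤ 2 * 10^5) ∧
              ¬ ((body.length : Int) + 1 ≤ mm)) by tauto)]
          left; exact ⟨by simp, rfl⟩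
        case pos =>
        rw [if_neg (show ¬¬ (2 ≤ nn ∧ nn ≤ 2 * 10^5) from not_not.mpr hc1)]
        by_cases hc2 : nn - 1 ≤ mm ∧ mm ≤ 2 * 10^5
        case neg =>
          rw [if_pos (show ¬ (nn - 1 ≤ mm ∧ mm ≤ 2 * 10^5) from hc2),
            if_neg (show ¬ ((2 ≤ nn ∧ nn ≤ 2 * 10^5 ∧ nn - 1 ≤ mm ∧ mm ≤ 2 * 10^5) ∧
              ¬ ((body.length : Int) + 1 ≤ mm)) by tauto)]
          left; exact ⟨by simp, rfl⟩
        case pos =>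
        rw [if_neg (not_not.mpr (show nn - 1 ≤ mm ∧ mm ≤ 2 * 10^5 from hc2))]
        by_cases hc3 : (lines.length : Int) ≤ idx + mm
        case pos =>
          rw [if_pos hc3,
            if_neg (show ¬ ((2 ≤ nn ∧ nn ≤ 2 * 10^5 ∧ nn - 1 ≤ mm ∧ mm ≤ 2 * 10^5) ∧
              ¬ ((body.length : Int) + 1 ≤ mm)) by
                rw [not_and, not_not]
                intro _
                omega)]
          left; exact ⟨by simp, rfl⟩
        case neg =>
        rw [if_neg hc3,
          if_pos (show (2 ≤ nn ∧ nn ≤ 2 * 10^5 ∧ nn - 1 ≤ mm ∧ mm ≤ 2 * 10^5) ∧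
            ¬ ((body.length : Int) + 1 ≤ mm) from ⟨⟨hc1.1, hc1.2, hc2.1, hc2.2⟩, by omega⟩)]
        have hm1 : 1 ≤ mm := by omega
        -- the edge lines of this case, shared by both programs
        set ss := body.take mm.toNat with hss_def
        have hss : ss.length = mm.toNat := by
          rw [hss_def, List.length_take]
          omega
        have hrange : PySem.List.pyRange 1 (mm + 1) 1 = PySem.List.pyRange 1 (1 + (ss.length : Int)) 1 := by
          rw [hss]; congr 1; omega
        have hh : ∀ (k : Nat), k < ss.length →
            PySem.List.pyGetD lines (idx + (1 + (k : Int))) "" = ss[k]! := by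
          intro k hk
          have hkm : k < mm.toNat := by omega
          have hin : idx.toNat + 1 + k < lines.length := by omega
          have hget : ss[k]! = lines[idx.toNat + 1 + k] := by
            rw [getElem!_pos ss k hk]
            simp only [hss_def, hbody, List.getElem_take, List.getElem_drop]
          have h1 : PySem.List.pyGetD lines (idx + (1 + (k : Int))) "" =
              lines[(idx + (1 + (k : Int))).toNat] :=
            PySem.List.pyGetD_eq_getElem lines "" (by omega) (by omega)
          rw [h1, hget]
          congr 1
          omega
        rw [hrange, edgeA_shift lines idx nn ss 1 _ hh, stageA' nn ss _]
        cases hE : edgesOf nn ss [] with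
        | none =>
          left
          constructor
          · simp
          · rfl
        | some es =>
          simp only [Option.map_some]
          have hcast : ((nn.toNat : Nat) : Int) = nn := by omega
          have hinv0 := init_inv nn hc1.1
          have hval : ∀ e ∈ es, 1 ≤ e.1 ∧ e.1 ≤ ((nn.toNat : Nat) : Int) ∧
              1 ≤ e.2 ∧ e.2 ≤ ((nn.toNat : Nat) : Int) := by
            intro e he
            have := edgesOf_valid nn ss [] es hE (by simp) e he
            rw [hcast]
            exact this
          have hinv := fold_couple nn.toNat es (PySem.List.pyRange 0 nn 1)
            (List.replicate nn.toNat 1) nn (PySem.List.pyRange 0 nn 1)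
            ((PySem.List.pyRange 0 nn 1).map (fun i => [i])) hinv0 hval
          have hfin := final_eq nn.toNat _ _ _ _ hinv (by omega)
          have hconn : connectedB nn es =
              (es.foldl qfStep (PySem.List.pyRange 0 nn 1,
                (PySem.List.pyRange 0 nn 1).map (fun i => [i]))).1.all
                (fun t => t == PySem.List.pyGetD
                  (es.foldl qfStep (PySem.List.pyRange 0 nn 1,
                    (PySem.List.pyRange 0 nn 1).map (fun i => [i]))).1 0 0) := rfl
          by_cases hcc : (es.foldl dsuStep (PySem.List.pyRange 0 nn 1,
              List.replicate nn.toNat 1, nn)).2.2 = 1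
          · right
            refine ⟨mm, hm1, ?_, ?_⟩
            · rw [if_neg (not_not.mpr hcc)]
            · have hall := hfin.mp hcc
              rw [if_pos (show connectedB nn es = true by rw [hconn]; exact hall)]
              rw [hbody, List.drop_drop]
              all_goals try (congr 1; omega)
          · left
            constructor
            · rw [if_pos hcc]
            · rw [if_neg (show ¬ (connectedB nn es = true) by
                rw [hconn]
                intro hall
                exact hcc (hfin.mpr hall))]

theorem caseLoop_eq (lines : List String) : ∀ (fuel : Nat) (idx : Int),
    0 ≤ idx → lines.length ≤ idx.toNat + fuel →
    caseLoopA lines fuel idx = caseLoopB (lines.drop idx.toNat) := by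
  intro fuel
  induction fuel with
  | zero =>
    intro idx h0 hfuel
    rw [List.drop_eq_nil_of_le (by omega)]
    simp [caseLoopA, caseLoopB]
  | succ fuel ih =>
    intro idx h0 hfuel
    simp only [caseLoopA]
    by_cases hlt : idx < (lines.length : Int)
    · rw [if_pos hlt]
      rcases head_case lines idx h0 hlt with ⟨hA, hB⟩ | ⟨m, hm, hAeq, hBeq⟩
      · rw [hA, if_pos rfl]
        exact hB.symm
      · rw [hAeq]
        simp only []
        rw [if_neg (by simp)]
        have hih := ih (idx + 1 + m) (by omega) (by omega)
        rw [hih, hBeq]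
        congr 2
        omega
    · rw [if_neg hlt]
      rw [List.drop_eq_nil_of_le (by omega)]
      simp [caseLoopB]

-- ===== VERDICT (by name: the statement is the Claim_ definition above) =====
theorem validate_cases_concatenated_spec : Claim_equal_validate_cases_concatenated := by
  intro lines _
  unfold Spec_validate_cases_concatenated validate_cases_concatenated validate_cases_concatenated_alt
  have h := caseLoop_eq lines (lines.length + 1) 0 (le_refl 0) (by simp)
  simpa using h
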